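-- pv_equiv track=rewrite | github.com/Ayushyadav2312/TextBlock_Aotumation | src/02_text_cleaning.py | detect_repeated_text
-- ===== SOURCE A (Python) =====
-- from collections import Counter
--
-- REPEAT_THRESHOLD = 0.6     # Appears on >60% of pages → header/footer
--
-- def detect_repeated_text(blocks):
--     """
--     Detect text repeated across many pages (headers/footers).
--     """
--     page_map = {}
--     for b in blocks:
--         page_map.setdefault(b["page"], set()).add(b["text"])
--
--     total_pages = len(page_map)
--     freq_counter = Counter()
--
--     for texts in page_map.values():
--         freq_counter.update(texts)
--
--     repeated = {
--         text for text, count in freq_counter.items()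
--         if count / total_pages >= REPEAT_THRESHOLD
--     }
--
--     return repeated
-- ===== SOURCE B (Python) =====
-- REPEAT_THRESHOLD = 0.6     # Appears on >60% of pages → header/footer
--
-- def detect_repeated_text(blocks):
--     """
--     Detect text repeated across many pages (headers/footers).
--     """
--     pages = list(dict.fromkeys(b["page"] for b in blocks))
--     page_sets = [{b["text"] for b in blocks if b["page"] == p} for p in pages]
--     total_pages = len(pages)
--     repeated = set()
--     for texts in page_sets:
--         for t in texts:
--             if t not in repeated and sum(t in s for s in page_sets) / total_pages >= REPEAT_THRESHOLD:
--                 repeated.add(t)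
--     return repeated
-- ===== Notes on version B (the rewrite author's own statement) =====
-- stated objective: alternative
-- what changed: Replaces the page->texts dict built via setdefault plus the separate Counter-aggregation pass with a deduped page list, per-page set comprehensions, and a direct count of how many page sets contain each candidate text.
import Mathlib
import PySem

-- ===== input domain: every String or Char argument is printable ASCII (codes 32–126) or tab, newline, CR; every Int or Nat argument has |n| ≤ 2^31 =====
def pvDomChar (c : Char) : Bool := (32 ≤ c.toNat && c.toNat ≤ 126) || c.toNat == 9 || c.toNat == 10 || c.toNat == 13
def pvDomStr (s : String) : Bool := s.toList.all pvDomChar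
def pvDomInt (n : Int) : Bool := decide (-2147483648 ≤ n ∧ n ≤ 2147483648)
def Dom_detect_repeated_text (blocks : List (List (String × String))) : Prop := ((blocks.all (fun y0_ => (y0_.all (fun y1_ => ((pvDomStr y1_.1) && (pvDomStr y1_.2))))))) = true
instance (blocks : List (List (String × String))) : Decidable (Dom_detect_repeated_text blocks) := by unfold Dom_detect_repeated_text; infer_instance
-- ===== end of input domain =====

-- B replaces A's page→texts dict plus Counter-aggregation pass by a deduped page list, per-page set
-- comprehensions and a direct per-text count of pages containing the text (alternative decomposition).
-- Return-value equivalence only; neither version mutates its argument.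

-- b["page"] / b["text"]: first-match lookup in the block's association list (total under Pre_).
def pvPage (b : List (String × String)) : String := ((PySem.Dict.mk b).get? "page").getD ""
def pvText (b : List (String × String)) : String := ((PySem.Dict.mk b).get? "text").getD ""

-- ===== PORT A =====
-- 'count / total_pages >= REPEAT_THRESHOLD' (float division vs the literal 0.6) is ported as
-- '3 * total_pages ≤ 5 * count'; the two agree for every total_pages below 10^12.
def detect_repeated_text (blocks : List (List (String × String))) : List String :=
  let page_map : PySem.Dict String (PySem.Set String) :=
    blocks.foldl (fun d b => d.modify (pvPage b) PySem.Set.empty (fun s => PySem.Set.add s (pvText b))) PySem.Dict.empty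
  let total_pages : Int := (page_map.size : Int)
  let freq : PySem.Dict String Int :=
    page_map.values.foldl (fun c texts => texts.foldl (fun c t => c.modify t 0 (· + 1)) c) PySem.Dict.empty
  freq.items.foldl (fun (r : PySem.Set String) it =>
    if 3 * total_pages ≤ 5 * it.2 then PySem.Set.add r it.1 else r) PySem.Set.empty

-- ===== PORT B =====
def detect_repeated_text_alt (blocks : List (List (String × String))) : List String :=
  let pages : List String := PySem.List.dedup (blocks.map pvPage)
  let page_sets : List (PySem.Set String) :=
    pages.map (fun p => PySem.Set.ofList ((blocks.filter (fun b => pvPage b == p)).map pvText))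
  let total_pages : Int := (pages.length : Int)
  page_sets.foldl (fun r texts =>
    texts.foldl (fun r t =>
      if PySem.Set.contains r t = false ∧
         3 * total_pages ≤ 5 * (page_sets.map (fun s => if PySem.Set.contains s t then (1 : Int) else 0)).sum
      then PySem.Set.add r t else r) r) PySem.Set.empty

-- ===== PRECONDITION & SPEC =====
-- Pre_ excludes exactly the inputs with a block lacking a "page" or "text" key, where the Python raises KeyError.
def Pre_detect_repeated_text (blocks : List (List (String × String))) : Prop :=
  ∀ b ∈ blocks, (PySem.Dict.mk b).contains "page" = true ∧ (PySem.Dict.mk b).contains "text" = true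
instance (blocks : List (List (String × String))) : Decidable (Pre_detect_repeated_text blocks) := by
  unfold Pre_detect_repeated_text; infer_instance
def pvWitness_detect_repeated_text : (List (List (String × String))) :=
  [[("page", "1"), ("text", "header")], [("page", "2"), ("text", "header")]]

def Spec_detect_repeated_text (blocks : List (List (String × String))) (out : List String) : Prop := out = detect_repeated_text_alt blocks
instance (blocks : List (List (String × String))) (out : List String) : Decidable (Spec_detect_repeated_text blocks out) := by unfold Spec_detect_repeated_text; infer_instance

-- ===== CLAIM (what is proved, stated in full; the proofs are below) =====
def Claim_equal_detect_repeated_text : Prop := ∀ (blocks : List (List (String × String))), Dom_detect_repeated_text blocks → Pre_detect_repeated_text blocks → Spec_detect_repeated_text blocks (detect_repeated_text blocks)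

-- ===== LEMMAS AND PROOFS =====

-- the distinct pages in first-occurrence order, and the set of texts of a given page
def pvPages (blocks : List (List (String × String))) : List String :=
  PySem.Set.ofList (blocks.map pvPage)
def pvGrp (blocks : List (List (String × String))) (p : String) : PySem.Set String :=
  PySem.Set.ofList ((blocks.filter (fun b => pvPage b == p)).map pvText)

-- A's grouping dict, characterised item by item
lemma pv_items_grouping (blocks : List (List (String × String))) :
    (blocks.foldl (fun d b => d.modify (pvPage b) PySem.Set.empty (fun s => PySem.Set.add s (pvText b))) PySem.Dict.empty).items
      = (pvPages blocks).map (fun p => (p, pvGrp blocks p)) := by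
  induction blocks using List.reverseRecOn with
  | nil => rfl
  | append_singleton xs b ih =>
    rw [List.foldl_append, List.foldl_cons, List.foldl_nil]
    set d := xs.foldl (fun d b => d.modify (pvPage b) PySem.Set.empty (fun s => PySem.Set.add s (pvText b))) PySem.Dict.empty with hd
    have hkeys : d.keys = pvPages xs := by
      show d.items.map (·.1) = _
      rw [ih]
      simp [List.map_map, Function.comp_def]
    have hnk : d.keys.Nodup := by rw [hkeys]; exact PySem.Set.nodup_ofList _
    have hP : pvPages (xs ++ [b]) = PySem.Set.add (pvPages xs) (pvPage b) := by
      rw [pvPages, List.map_append, List.map_singleton, PySem.Set.ofList_append_singleton]; rfl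
    have hG : ∀ p, pvGrp (xs ++ [b]) p =
        if pvPage b = p then PySem.Set.add (pvGrp xs p) (pvText b) else pvGrp xs p := by
      intro p
      rw [pvGrp, List.filter_append, List.filter_singleton]
      by_cases hpb : pvPage b = p
      · rw [if_pos hpb, show (pvPage b == p) = true by simp [hpb], Bool.cond_true,
          List.map_append, List.map_singleton, PySem.Set.ofList_append_singleton]; rfl
      · rw [if_neg hpb, show (pvPage b == p) = false by simp [hpb], Bool.cond_false,
          List.append_nil]; rfl
    by_cases hmem : pvPage b ∈ pvPages xs
    · have hc : d.contains (pvPage b) = true := by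
        rw [PySem.Dict.contains_eq_decide_mem_keys, hkeys]; simp [hmem]
      have hgd : d.getD (pvPage b) PySem.Set.empty = pvGrp xs (pvPage b) := by
        refine PySem.Dict.getD_of_mem_items d ?_ hnk _
        rw [ih]; exact List.mem_map_of_mem hmem
      rw [PySem.Dict.modify, PySem.Dict.items_insert_of_contains _ _ hc, ih, hgd, hP,
        PySem.Set.add_of_mem hmem, List.map_map]
      refine List.map_congr_left ?_
      intro p hp
      by_cases hpb : pvPage b = p
      · subst hpb; simp [hG]
      · have hps : ¬p = pvPage b := fun h => hpb (Eq.symm h)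
        simp [hps, hG, hpb]
    · have hc : d.contains (pvPage b) = false := by
        rw [PySem.Dict.contains_eq_decide_mem_keys, hkeys]; simp [hmem]
      have hgd : d.getD (pvPage b) PySem.Set.empty = PySem.Set.empty :=
        PySem.Dict.getD_of_not_contains _ _ hc
      rw [PySem.Dict.modify, PySem.Dict.items_insert_of_not_contains _ _ hc, ih, hgd, hP,
        PySem.Set.add_of_not_mem hmem, List.map_append, List.map_singleton]
      congr 1
      · refine List.map_congr_left ?_
        intro p hp
        have hpb : pvPage b ≠ p := fun h => hmem (h ▸ hp)
        rw [hG, if_neg hpb]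
      · rw [hG, if_pos rfl]
        have hfil : xs.filter (fun b' => pvPage b' == pvPage b) = [] := by
          refine List.filter_eq_nil_iff.mpr ?_
          intro a ha
          simp only [beq_iff_eq]
          intro h
          apply hmem
          rw [pvPages, ← h]
          exact (PySem.Set.mem_ofList _ _).mpr (List.mem_map.mpr ⟨a, ha, rfl⟩)
        have : pvGrp xs (pvPage b) = PySem.Set.empty := by
          rw [pvGrp, hfil, List.map_nil, PySem.Set.ofList_nil]
          exact rfl
        rw [this]

-- a guarded add-loop is Set.update with the filtered list
lemma pv_foldl_addif {α : Type} [BEq α] [LawfulBEq α] (cond : α → Prop) [DecidablePred cond]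
    (xs : List α) (r : PySem.Set α) :
    xs.foldl (fun r t => if cond t then PySem.Set.add r t else r) r
      = PySem.Set.update r (xs.filter (fun t => decide (cond t))) := by
  induction xs generalizing r with
  | nil => simp [PySem.Set.update_nil]
  | cons x xs ih =>
    by_cases h : cond x
    · simp only [List.foldl_cons, List.filter_cons, h, if_pos, decide_true, PySem.Set.update_cons, ih]
    · simp [List.foldl_cons, h, ih]

-- B's guard 't not in repeated and cond t' produces the same loop result
lemma pv_foldl_addif2 {α : Type} [BEq α] [LawfulBEq α] (cond : α → Prop) [DecidablePred cond]
    (xs : List α) (r : PySem.Set α) :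
    xs.foldl (fun r t => if PySem.Set.contains r t = false ∧ cond t then PySem.Set.add r t else r) r
      = PySem.Set.update r (xs.filter (fun t => decide (cond t))) := by
  induction xs generalizing r with
  | nil => simp [PySem.Set.update_nil]
  | cons x xs ih =>
    rw [List.foldl_cons, List.filter_cons]
    by_cases h : cond x
    · by_cases hm : x ∈ r
      · have hc : PySem.Set.contains r x = true := (PySem.Set.contains_iff r x).mpr hm
        rw [if_neg (by rw [hc]; rintro ⟨h1, -⟩; cases h1), if_pos (by simp [h]),
          PySem.Set.update_cons, ih, PySem.Set.add_of_mem hm]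
      · have hc : PySem.Set.contains r x = false := by
          simpa using fun hh => hm ((PySem.Set.contains_iff r x).mp hh)
        rw [if_pos ⟨hc, h⟩, if_pos (by simp [h]), PySem.Set.update_cons, ih]
    · rw [if_neg (by simp [h]), if_neg (by simp [h]), ih]

-- ofList commutes with filter
lemma pv_ofList_filter {α : Type} [BEq α] [LawfulBEq α] (p : α → Bool) (xs : List α) :
    PySem.Set.ofList (xs.filter p) = (PySem.Set.ofList xs).filter p := by
  induction xs using List.reverseRecOn with
  | nil => rfl
  | append_singleton xs x ih =>
    rw [List.filter_append, PySem.Set.ofList_append_singleton]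
    by_cases hp : p x = true
    · rw [List.filter_singleton, hp, Bool.cond_true, PySem.Set.ofList_append_singleton, ih]
      by_cases hm : x ∈ PySem.Set.ofList xs
      · rw [PySem.Set.add_of_mem hm, PySem.Set.add_of_mem]
        simp [List.mem_filter, hm, hp]
      · rw [PySem.Set.add_of_not_mem, PySem.Set.add_of_not_mem hm, List.filter_append,
          List.filter_singleton, hp, Bool.cond_true]
        simp [List.mem_filter, hm]
    · rw [List.filter_singleton, eq_false_of_ne_true hp, Bool.cond_false, List.append_nil, ih]
      by_cases hm : x ∈ PySem.Set.ofList xs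
      · rw [PySem.Set.add_of_mem hm]
      · rw [PySem.Set.add_of_not_mem hm, List.filter_append, List.filter_singleton,
          eq_false_of_ne_true hp, Bool.cond_false, List.append_nil]

-- a text's multiplicity in the concatenated page sets is the number of page sets containing it
lemma pv_count_flatten_sets (l : List (PySem.Set String)) (hn : ∀ s ∈ l, List.Nodup s) (t : String) :
    (List.count t l.flatten : Int)
      = (l.map (fun s => if PySem.Set.contains s t then (1 : Int) else 0)).sum := by
  induction l with
  | nil => simp
  | cons s l ih =>
    have hns : List.Nodup s := hn s (by simp)
    rw [List.flatten_cons, List.count_append, List.map_cons, List.sum_cons,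
      ← ih (fun s hs => hn s (by simp [hs])), hns.count]
    by_cases hm : t ∈ s
    · rw [if_pos hm, if_pos ((PySem.Set.contains_iff s t).mpr hm)]
      push_cast; ring
    · rw [if_neg hm, if_neg (by simpa using fun hh => hm ((PySem.Set.contains_iff s t).mp hh))]
      push_cast; ring

-- ===== VERDICT (by name: the statement is the Claim_ definition above) =====
theorem detect_repeated_text_spec : Claim_equal_detect_repeated_text := by
  intro blocks _ _
  unfold Spec_detect_repeated_text
  simp only [detect_repeated_text, detect_repeated_text_alt, PySem.List.dedup_eq_ofList]
  rw [PySem.Dict.size, PySem.Dict.values, pv_items_grouping blocks]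
  set P : List String := pvPages blocks with hP
  set L : List (PySem.Set String) := P.map (fun p => pvGrp blocks p) with hL
  have hmm : (P.map (fun p => (p, pvGrp blocks p))).map (·.2) = L := by
    rw [List.map_map]; rfl
  rw [hmm, List.length_map, ← List.foldl_flatten, ← PySem.Dict.counter_eq_foldl,
    PySem.Dict.items_counter, List.foldl_map]
  set T : Int := (P.length : Int) with hT
  set S : List String := L.flatten with hS
  have hraw : PySem.Set.ofList (blocks.map pvPage) = P := by rw [hP, pvPages]
  simp only [hraw]
  have hps : P.map (fun p => PySem.Set.ofList ((blocks.filter (fun b => pvPage b == p)).map pvText)) = L := rfl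
  simp only [hps]
  rw [pv_foldl_addif (fun k => 3 * T ≤ 5 * ((List.count k S : Int))),
    ← List.foldl_flatten, ← hS, ← hT,
    pv_foldl_addif2 (fun t => 3 * T ≤ 5 * (L.map (fun s => if PySem.Set.contains s t then (1 : Int) else 0)).sum),
    show (PySem.Set.empty : PySem.Set String) = [] from rfl,
    PySem.Set.update_nil_left, PySem.Set.update_nil_left, ← pv_ofList_filter, PySem.Set.ofList_ofList]
  congr 1
  refine List.filter_congr ?_
  intro t _
  rw [pv_count_flatten_sets L ?hn t]
  intro s hs
  obtain ⟨p, -, rfl⟩ := List.mem_map.mp hs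
  exact PySem.Set.nodup_ofList _
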